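-- pv_equiv track=rewrite | github.com/pypi-data/pypi-mirror-279 | packages/p-vs-np-library/p_vs_np_library-0.1.tar.gz/p_vs_np_library-0.1/p_vs_np/database_problems/preemptive_scheduling.py | list_scheduling
-- ===== SOURCE A (Python) =====
-- def list_scheduling(tasks):
--     tasks.sort(key=lambda x: x[0])  # Sort tasks based on release times
--     schedule = []
--     current_time = 0
--
--     for task in tasks:
--         task_id, release_time, duration, deadline = task
--         if current_time < release_time:
--             current_time = release_time
--         completion_time = current_time + duration
--         schedule.append((task_id, current_time, completion_time))
--         current_time = completion_time
--
--     return schedule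
-- ===== SOURCE B (Python) =====
-- def list_scheduling(tasks):
--     tasks.sort(key=lambda x: x[0])  # same in-place sort as A (mutation preserved)
--     def go(t, rest):
--         if not rest:
--             return []
--         task_id, release_time, duration, deadline = rest[0]
--         start = max(t, release_time)
--         completion = start + duration
--         return [(task_id, start, completion)] + go(completion, rest[1:])
--     return go(0, tasks)
-- ===== Notes on version B (the rewrite author's own statement) =====
-- stated objective: alternative
-- what changed: Replaces the imperative loop with a mutable current_time and schedule.append by a recursive helper that threads the time through calls and builds the schedule by consing, using max instead of a conditional assignment.
import Mathlib
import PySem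

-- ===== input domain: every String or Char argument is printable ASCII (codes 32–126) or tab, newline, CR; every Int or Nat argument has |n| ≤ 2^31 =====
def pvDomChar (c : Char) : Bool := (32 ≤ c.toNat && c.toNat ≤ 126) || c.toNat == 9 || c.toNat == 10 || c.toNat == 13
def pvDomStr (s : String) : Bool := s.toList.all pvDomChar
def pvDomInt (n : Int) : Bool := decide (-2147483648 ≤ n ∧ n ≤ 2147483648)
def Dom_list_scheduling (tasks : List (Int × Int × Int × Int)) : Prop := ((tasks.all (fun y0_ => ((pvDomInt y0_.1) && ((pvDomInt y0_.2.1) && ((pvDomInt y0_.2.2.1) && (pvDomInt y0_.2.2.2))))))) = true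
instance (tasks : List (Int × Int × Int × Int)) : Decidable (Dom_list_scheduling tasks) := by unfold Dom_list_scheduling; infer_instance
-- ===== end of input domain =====

-- ===== PORT A =====
-- A: sort in place by the tuple's first field, then loop appending (id, start, completion).
-- (Python A mutates its argument by sorting in place; the equivalence proved here is about the return value.)
def list_scheduling (tasks : List (Int × Int × Int × Int)) : List (Int × Int × Int) :=
  let ts := PySem.List.sorted tasks (key := fun x => x.1)
  (ts.foldl
    (fun (st : List (Int × Int × Int) × Int) task =>
      let taskId := task.1
      let releaseTime := task.2.1
      let duration := task.2.2.1
      let ct := if st.2 < releaseTime then releaseTime else st.2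
      let completionTime := ct + duration
      (st.1 ++ [(taskId, ct, completionTime)], completionTime))
    ([], 0)).1

-- ===== PORT B =====
-- B: same sort, then a recursive helper threading the time and consing the schedule.
def altGo (t : Int) : List (Int × Int × Int × Int) → List (Int × Int × Int)
  | [] => []
  | task :: rest =>
    let start := max t task.2.1
    let completion := start + task.2.2.1
    (task.1, start, completion) :: altGo completion rest

def list_scheduling_alt (tasks : List (Int × Int × Int × Int)) : List (Int × Int × Int) :=
  altGo 0 (PySem.List.sorted tasks (key := fun x => x.1))

-- ===== PRECONDITION & SPEC =====
def Spec_list_scheduling (tasks : List (Int × Int × Int × Int)) (out : List (Int × Int × Int)) : Prop := out = list_scheduling_alt tasks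
instance (tasks : List (Int × Int × Int × Int)) (out : List (Int × Int × Int)) : Decidable (Spec_list_scheduling tasks out) := by unfold Spec_list_scheduling; infer_instance

-- ===== CLAIM (what is proved, stated in full; the proofs are below) =====
def Claim_equal_list_scheduling : Prop := ∀ (tasks : List (Int × Int × Int × Int)), Dom_list_scheduling tasks → Spec_list_scheduling tasks (list_scheduling tasks)

-- ===== LEMMAS AND PROOFS =====

-- ===== VERDICT (by name: the statement is the Claim_ definition above) =====
theorem foldl_eq_altGo (ts : List (Int × Int × Int × Int)) (acc : List (Int × Int × Int)) (t : Int) :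
    (ts.foldl
      (fun (st : List (Int × Int × Int) × Int) task =>
        let taskId := task.1
        let releaseTime := task.2.1
        let duration := task.2.2.1
        let ct := if st.2 < releaseTime then releaseTime else st.2
        let completionTime := ct + duration
        (st.1 ++ [(taskId, ct, completionTime)], completionTime))
      (acc, t)).1 = acc ++ altGo t ts := by
  induction ts generalizing acc t with
  | nil => simp [altGo]
  | cons task rest ih =>
    simp only [List.foldl_cons, altGo]
    rw [ih]
    have h : (if t < task.2.1 then task.2.1 else t) = max t task.2.1 := by omega
    simp [h]

theorem list_scheduling_spec : Claim_equal_list_scheduling := by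
  intro tasks _
  unfold Spec_list_scheduling list_scheduling list_scheduling_alt
  simpa using foldl_eq_altGo (PySem.List.sorted tasks (key := fun x => x.1)) [] 0
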